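-- pv_equiv track=rewrite | github.com/cheon4050/CodingTest-Study | 30주차/16724/kodongcheon.py | dfs
-- ===== SOURCE A (Python) =====
-- def dfs(x, y, arr, visited, cnt, routeArr):
--     if visited[x][y]:
--         if visited[x][y] != cnt:
--             return True, routeArr
--         else:
--             return False, routeArr
--     routeArr.append((x, y))
--     visited[x][y] = cnt
--     if arr[x][y] == "D":
--         return dfs(x+1, y, arr, visited, cnt, routeArr)
--     if arr[x][y] == "L":
--         return dfs(x, y-1, arr, visited, cnt, routeArr)
--     if arr[x][y] == "R":
--         return dfs(x, y+1, arr, visited, cnt, routeArr)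
--     if arr[x][y] == "U":
--         return dfs(x-1, y, arr, visited, cnt, routeArr)
-- ===== SOURCE B (Python) =====
-- _STEP = {"D": (1, 0), "L": (0, -1), "R": (0, 1), "U": (-1, 0)}
--
-- def dfs(x, y, arr, visited, cnt, routeArr):
--     seen = set()
--     while (x, y) not in seen:
--         v = visited[x][y]
--         if v:
--             return v != cnt, routeArr
--         seen.add((x, y))
--         routeArr.append((x, y))
--         visited[x][y] = cnt
--         d = _STEP.get(arr[x][y])
--         if d is None:
--             return
--         x += d[0]
--         y += d[1]
--     return False, routeArr
-- ===== Notes on version B (the rewrite author's own statement) =====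
-- stated objective: simpler
-- what changed: A's tail recursion is replaced by an explicit while-loop that walks the arrow chain with a direction-delta dict and a local seen-set, so no call stack is used (no RecursionError risk on long chains); mutation of visited/routeArr is identical.
-- outside the precondition, e.g. on dfs(0, 0, [['R', 'X']], [[0, 5]], 1, []): A returns (True, [(0, 0)]), B returns (True, [(0, 0)])
import Mathlib
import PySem

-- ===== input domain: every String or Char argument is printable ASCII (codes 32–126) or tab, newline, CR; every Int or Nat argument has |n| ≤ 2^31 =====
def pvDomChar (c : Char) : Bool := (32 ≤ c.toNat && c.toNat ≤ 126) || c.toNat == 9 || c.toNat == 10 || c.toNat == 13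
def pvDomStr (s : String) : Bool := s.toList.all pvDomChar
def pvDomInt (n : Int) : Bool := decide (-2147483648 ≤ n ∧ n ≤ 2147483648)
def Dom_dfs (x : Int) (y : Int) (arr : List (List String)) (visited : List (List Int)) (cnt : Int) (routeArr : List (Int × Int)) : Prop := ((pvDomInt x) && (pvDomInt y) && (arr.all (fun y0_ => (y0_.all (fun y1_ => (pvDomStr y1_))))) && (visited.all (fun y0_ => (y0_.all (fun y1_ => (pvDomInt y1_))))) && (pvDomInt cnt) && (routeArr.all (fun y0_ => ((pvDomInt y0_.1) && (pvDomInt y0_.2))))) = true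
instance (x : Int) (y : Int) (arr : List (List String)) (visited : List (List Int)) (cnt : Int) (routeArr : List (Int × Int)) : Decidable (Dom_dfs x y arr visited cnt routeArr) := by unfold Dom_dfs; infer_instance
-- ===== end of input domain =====

-- B rewrites A's tail recursion as an explicit while-loop with a step-delta dict and a `seen` set (objective: simpler/iterative, no
-- RecursionError risk). Both A and B mutate `visited` and `routeArr` in place identically; the theorems below are about the return value.

-- grid[i][j] read, Python semantics (negative wrap; none = IndexError)
def readCell {α : Type} (g : List (List α)) (i j : Int) : Option α :=
  (PySem.List.pyGet? g i).bind (fun row => PySem.List.pyGet? row j)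

-- grid[i][j] = v, Python semantics (only called after a successful read, so the indices are in range)
def setCell {α : Type} (g : List (List α)) (i j : Int) (v : α) : List (List α) :=
  match PySem.List.pyGet? g i with
  | none => g
  | some row => PySem.List.pySetD g i (PySem.List.pySetD row j v)

-- total number of cells; 4*cells+2 fuel dominates the number of steps of any returning run of either
-- program (each step reads a fresh coordinate pair of which there are at most 4*cells readable ones)
def cellCount {α : Type} (g : List (List α)) : Nat := g.foldl (fun a r => a + r.length) 0

-- ===== PORT A =====
-- literal transliteration of A's recursion, fuel-guarded for totality (fuel exhaustion / IndexError /
-- Python's bare `return None` on an unrecognized cell all yield a default, and are excluded by Pre_)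
def dfsA : Nat → Int → Int → List (List String) → List (List Int) → Int → List (Int × Int) → Bool × (List (Int × Int))
  | 0, _, _, _, _, _, routeArr => (false, routeArr)
  | Nat.succ fuel, x, y, arr, visited, cnt, routeArr =>
    match readCell visited x y with
    | none => (false, routeArr)
    | some v =>
      if v ≠ 0 then
        if v ≠ cnt then (true, routeArr) else (false, routeArr)
      else
        let routeArr' := routeArr ++ [(x, y)]
        let visited' := setCell visited x y cnt
        match readCell arr x y with
        | none => (false, routeArr')
        | some c =>
          if c = "D" then dfsA fuel (x+1) y arr visited' cnt routeArr'
          else if c = "L" then dfsA fuel x (y-1) arr visited' cnt routeArr'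
          else if c = "R" then dfsA fuel x (y+1) arr visited' cnt routeArr'
          else if c = "U" then dfsA fuel (x-1) y arr visited' cnt routeArr'
          else (false, routeArr')

def dfs (x : Int) (y : Int) (arr : List (List String)) (visited : List (List Int)) (cnt : Int) (routeArr : List (Int × Int)) : Bool × (List (Int × Int)) :=
  dfsA (4 * cellCount visited + 2) x y arr visited cnt routeArr

-- ===== PORT B =====
-- B's direction table _STEP
def pvSTEP : PySem.Dict String (Int × Int) :=
  ⟨[("D", ((1 : Int), (0 : Int))), ("L", (0, -1)), ("R", (0, 1)), ("U", (-1, 0))]⟩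

-- B's while loop: state = (seen, x, y, visited, routeArr); same fuel guard
def dfsLoop : Nat → PySem.Set (Int × Int) → Int → Int → List (List String) → List (List Int) → Int → List (Int × Int) → Bool × (List (Int × Int))
  | 0, _, _, _, _, _, _, routeArr => (false, routeArr)
  | Nat.succ fuel, seen, x, y, arr, visited, cnt, routeArr =>
    if PySem.Set.contains seen (x, y) then (false, routeArr)   -- while-condition fails: return False, routeArr
    else
      match readCell visited x y with
      | none => (false, routeArr)
      | some v =>
        if v ≠ 0 then (decide (v ≠ cnt), routeArr)
        else
          let seen' := PySem.Set.add seen (x, y)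
          let routeArr' := routeArr ++ [(x, y)]
          let visited' := setCell visited x y cnt
          match readCell arr x y with
          | none => (false, routeArr')
          | some c =>
            match PySem.Dict.get? pvSTEP c with
            | none => (false, routeArr')                        -- Python B's bare `return`
            | some d => dfsLoop fuel seen' (x + d.1) (y + d.2) arr visited' cnt routeArr'

def dfs_alt (x : Int) (y : Int) (arr : List (List String)) (visited : List (List Int)) (cnt : Int) (routeArr : List (Int × Int)) : Bool × (List (Int × Int)) :=
  dfsLoop (4 * cellCount visited + 2) PySem.Set.empty x y arr visited cnt routeArr

-- ===== PRECONDITION & SPEC =====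
-- Pre_dfs = inputs on which Python A returns a (Bool, list) value, stated in closed form: either the start
-- cell is already marked (immediate return), or the call is a real walk over a well-formed instance of the
-- BOJ 16724 problem A solves: a non-empty rectangular grid of "D"/"L"/"R"/"U" arrows none of which points off
-- the grid, visited of the same shape, in-range non-negative start, and cnt ≠ 0 (with cnt = 0 marking is
-- ineffective and A recurses forever).  Outside these conditions a walk can end in an IndexError, Python A's
-- bare `return None` (no value of the declared pair type), or infinite recursion, and which of these happens
-- cannot be told in closed form without running the walk, so Pre_ conservatively excludes all such walks even
-- though some of them happen to hit a marked cell first and return normally (B agrees with A on those too).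
def Pre_dfs (x : Int) (y : Int) (arr : List (List String)) (visited : List (List Int)) (cnt : Int) (routeArr : List (Int × Int)) : Prop :=
  (readCell visited x y ≠ none ∧ (readCell visited x y).getD 0 ≠ 0)
  ∨ (cnt ≠ 0 ∧ 0 < arr.length ∧ 0 < arr.headI.length ∧
     visited.length = arr.length ∧
     arr.all (fun r => r.length = arr.headI.length) ∧
     visited.all (fun r => r.length = arr.headI.length) ∧
     0 ≤ x ∧ x < (arr.length : Int) ∧ 0 ≤ y ∧ y < (arr.headI.length : Int) ∧
     arr.all (fun r => r.all (fun c => c = "D" ∨ c = "L" ∨ c = "R" ∨ c = "U")) ∧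
     arr.headI.all (fun c => c ≠ "U") ∧ (arr.getLast?.getD []).all (fun c => c ≠ "D") ∧
     arr.all (fun r => r.headI ≠ "L" ∧ r.getLast?.getD "" ≠ "R"))

instance (x : Int) (y : Int) (arr : List (List String)) (visited : List (List Int)) (cnt : Int) (routeArr : List (Int × Int)) : Decidable (Pre_dfs x y arr visited cnt routeArr) := by unfold Pre_dfs; infer_instance

def pvWitness_dfs : Int × Int × List (List String) × List (List Int) × Int × (List (Int × Int)) :=
  (0, 0, [["D"], ["U"]], [[0], [0]], 1, [])

def Spec_dfs (x : Int) (y : Int) (arr : List (List String)) (visited : List (List Int)) (cnt : Int) (routeArr : List (Int × Int)) (out : Bool × (List (Int × Int))) : Prop := out = dfs_alt x y arr visited cnt routeArr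
instance (x : Int) (y : Int) (arr : List (List String)) (visited : List (List Int)) (cnt : Int) (routeArr : List (Int × Int)) (out : Bool × (List (Int × Int))) : Decidable (Spec_dfs x y arr visited cnt routeArr out) := by unfold Spec_dfs; infer_instance

-- ===== CLAIM (what is proved, stated in full; the proofs are below) =====
def Claim_equal_dfs : Prop := ∀ (x : Int) (y : Int) (arr : List (List String)) (visited : List (List Int)) (cnt : Int) (routeArr : List (Int × Int)), Dom_dfs x y arr visited cnt routeArr → Pre_dfs x y arr visited cnt routeArr → Spec_dfs x y arr visited cnt routeArr (dfs x y arr visited cnt routeArr)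

-- ===== LEMMAS AND PROOFS =====

-- writing at the index a successful read used, then reading it back, gives the new value
theorem pyGet?_pySetD_self {α : Type} (xs : List α) (i : Int) (v w : α)
    (h : PySem.List.pyGet? xs i = some w) :
    PySem.List.pyGet? (PySem.List.pySetD xs i v) i = some v := by
  unfold PySem.List.pyGet? at h ⊢
  unfold PySem.List.pySetD PySem.List.pySet?
  cases hk : PySem.List.pyIdx? xs.length i with
  | none => simp [hk] at h
  | some k =>
    rw [hk] at h
    simp only [Option.map_some, Option.getD_some, List.length_set, hk, Option.bind_some] at h ⊢
    rcases List.getElem?_eq_some_iff.mp h with ⟨hlt, -⟩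
    simp [hlt]

-- reading any index after a write: either the new value (with the old value readable before), or unchanged
theorem pyGet?_pySetD_cases {α : Type} (xs : List α) (i j : Int) (v w : α)
    (h : PySem.List.pyGet? xs i = some w) :
    (PySem.List.pyGet? (PySem.List.pySetD xs i v) j = some v ∧ PySem.List.pyGet? xs j = some w)
    ∨ PySem.List.pyGet? (PySem.List.pySetD xs i v) j = PySem.List.pyGet? xs j := by
  unfold PySem.List.pyGet? at h ⊢
  unfold PySem.List.pySetD PySem.List.pySet?
  cases hk : PySem.List.pyIdx? xs.length i with
  | none => simp [hk] at h
  | some k =>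
    rw [hk] at h
    simp only [Option.map_some, Option.getD_some, List.length_set, Option.bind_some] at h ⊢
    rcases List.getElem?_eq_some_iff.mp h with ⟨hlt, -⟩
    cases hm : PySem.List.pyIdx? xs.length j with
    | none => right; rfl
    | some m =>
      by_cases hmk : m = k
      · subst hmk
        left
        constructor
        · simp [List.getElem?_set, hlt]
        · exact h
      · right
        simp [List.getElem?_set_ne (fun hh => hmk hh.symm)]

theorem readCell_setCell {α : Type} (g : List (List α)) (x y : Int) (c v : α)
    (h : readCell g x y = some v) :
    readCell (setCell g x y c) x y = some c ∧
    ∀ a b : Int, readCell (setCell g x y c) a b = some c ∨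
                 readCell (setCell g x y c) a b = readCell g a b := by
  unfold readCell at h
  cases hrow : PySem.List.pyGet? g x with
  | none => rw [hrow] at h; simp at h
  | some row =>
    rw [hrow] at h
    simp only [Option.bind_some] at h
    have hset : setCell g x y c = PySem.List.pySetD g x (PySem.List.pySetD row y c) := by
      unfold setCell; rw [hrow]
    constructor
    · unfold readCell
      rw [hset, pyGet?_pySetD_self g x _ row hrow]
      simpa using pyGet?_pySetD_self row y c v h
    · intro a b
      unfold readCell
      rw [hset]
      rcases pyGet?_pySetD_cases g x a (PySem.List.pySetD row y c) row hrow with ⟨h1, h2⟩ | h1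
      · rw [h1, h2]
        simp only [Option.bind_some]
        rcases pyGet?_pySetD_cases row y b c v h with ⟨h3, _⟩ | h3
        · left; exact h3
        · right; rw [h3]
      · right; rw [h1]

-- lockstep equivalence of A's recursion and B's loop: a position is in `seen` exactly when B marked it
-- during this call, in which case `visited` holds cnt there — so A's visited-check returns False just as
-- B's seen-check does; everywhere else the two bodies perform the same reads, writes and moves.
theorem loop_eq (fuel : Nat) : ∀ (seen : PySem.Set (Int × Int)) (x y : Int)
    (arr : List (List String)) (visited : List (List Int)) (cnt : Int) (routeArr : List (Int × Int)),
    cnt ≠ 0 →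
    (∀ p ∈ seen, readCell visited p.1 p.2 = some cnt) →
    dfsA fuel x y arr visited cnt routeArr = dfsLoop fuel seen x y arr visited cnt routeArr := by
  induction fuel with
  | zero => intro seen x y arr visited cnt routeArr _ _; rfl
  | succ fuel ih =>
    intro seen x y arr visited cnt routeArr hcnt hinv
    show dfsA (Nat.succ fuel) x y arr visited cnt routeArr
       = dfsLoop (Nat.succ fuel) seen x y arr visited cnt routeArr
    by_cases hmem : (x, y) ∈ seen
    · have hv : readCell visited x y = some cnt := hinv (x, y) hmem
      simp [dfsA, dfsLoop, hv, hcnt, hmem]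
    · have hc : PySem.Set.contains seen (x, y) = false := by
        unfold PySem.Set.contains
        simp [hmem]
      cases hv : readCell visited x y with
      | none => simp [dfsA, dfsLoop, hv, hmem]
      | some v =>
        by_cases hv0 : v = 0
        · subst hv0
          -- the marking step; both append, mark, and move by the same delta
          have hadd : PySem.Set.add seen (x, y) = seen ++ [(x, y)] := by
            unfold PySem.Set.add
            rw [hc]; simp
          have hsc := readCell_setCell visited x y cnt 0 hv
          have hinv' : ∀ p ∈ PySem.Set.add seen (x, y),
              readCell (setCell visited x y cnt) p.1 p.2 = some cnt := by
            intro p hp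
            rw [hadd] at hp
            rcases List.mem_append.mp hp with hp | hp
            · rcases hsc.2 p.1 p.2 with h1 | h1
              · exact h1
              · rw [h1]; exact hinv p hp
            · simp at hp
              subst hp
              exact hsc.1
          cases hch : readCell arr x y with
          | none => simp [dfsA, dfsLoop, hv, hmem, hch]
          | some c =>
            by_cases hD : c = "D"
            · subst hD; simp [dfsA, dfsLoop, hv, hmem, hch, PySem.Dict.get?, pvSTEP,
                ih _ _ _ _ _ _ _ hcnt hinv']
            · by_cases hL : c = "L"
              · subst hL; simp [dfsA, dfsLoop, hv, hmem, hch, PySem.Dict.get?, pvSTEP, sub_eq_add_neg,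
                  ih _ _ _ _ _ _ _ hcnt hinv']
              · by_cases hR : c = "R"
                · subst hR; simp [dfsA, dfsLoop, hv, hmem, hch, PySem.Dict.get?, pvSTEP,
                    ih _ _ _ _ _ _ _ hcnt hinv']
                · by_cases hU : c = "U"
                  · subst hU; simp [dfsA, dfsLoop, hv, hmem, hch, PySem.Dict.get?, pvSTEP, sub_eq_add_neg,
                      ih _ _ _ _ _ _ _ hcnt hinv']
                  · have hD' : (("D" : String) == c) = false :=
                      beq_eq_false_iff_ne.mpr (fun h => hD h.symm)
                    have hL' : (("L" : String) == c) = false :=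
                      beq_eq_false_iff_ne.mpr (fun h => hL h.symm)
                    have hR' : (("R" : String) == c) = false :=
                      beq_eq_false_iff_ne.mpr (fun h => hR h.symm)
                    have hU' : (("U" : String) == c) = false :=
                      beq_eq_false_iff_ne.mpr (fun h => hU h.symm)
                    have hfind : PySem.Dict.get? pvSTEP c = none := by
                      simp [PySem.Dict.get?, pvSTEP, List.find?, hD', hL', hR', hU']
                    simp [dfsA, dfsLoop, hv, hmem, hch, hfind, hD, hL, hR, hU]
        · -- an already-marked cell: both return (v != cnt, routeArr)
          by_cases hvc : v = cnt
          · subst hvc; simp [dfsA, dfsLoop, hv, hmem, hv0]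
          · simp [dfsA, dfsLoop, hv, hmem, hv0, hvc]

-- ===== VERDICT (by name: the statement is the Claim_ definition above) =====
theorem dfs_spec : Claim_equal_dfs := by
  intro x y arr visited cnt routeArr _ hpre
  unfold Spec_dfs dfs dfs_alt
  by_cases hcnt : cnt = 0
  · -- with cnt = 0 Pre_ forces the immediate-return case; one step of each program
    rcases hpre with ⟨hne, hval⟩ | ⟨hc0, _⟩
    · cases hv : readCell visited x y with
      | none => exact absurd hv hne
      | some v =>
        rw [hv] at hval
        simp only [Option.getD_some] at hval
        have hc : PySem.Set.contains (PySem.Set.empty : PySem.Set (Int × Int)) (x, y) = false := rfl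
        by_cases hvc : v = cnt
        · subst hvc; simp [dfsA, dfsLoop, hv, hval]
        · simp [dfsA, dfsLoop, hv, hval, hvc]
    · exact absurd hcnt hc0
  · exact loop_eq _ PySem.Set.empty x y arr visited cnt routeArr hcnt (by simp [PySem.Set.empty])
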